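-- pv_equiv track=rewrite | github.com/rolansy/git-me-ai | backend/ai_agent.py | _infer_platform
-- ===== SOURCE A (Python) =====
-- from typing import Dict, Tuple, List
--
-- def _infer_platform(dependencies: List[str]) -> str:
--     if any('react-native' in dep.lower() for dep in dependencies):
--         return "iOS and Android using React Native"
--     elif any('flutter' in dep.lower() for dep in dependencies):
--         return "cross-platform mobile development with Flutter"
--     elif any('swift' in dep.lower() for dep in dependencies):
--         return "iOS devices"
--     elif any('kotlin' in dep.lower() for dep in dependencies):
--         return "Android devices"
--     else:
--         return "mobile platforms"
-- ===== SOURCE B (Python) =====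
-- _RULES = [
--     ("react-native", "iOS and Android using React Native"),
--     ("flutter", "cross-platform mobile development with Flutter"),
--     ("swift", "iOS devices"),
--     ("kotlin", "Android devices"),
-- ]
--
-- def _infer_platform(dependencies):
--     best = len(_RULES)
--     for dep in dependencies:
--         low = dep.lower()
--         for i, (kw, _msg) in enumerate(_RULES):
--             if i < best and kw in low:
--                 best = i
--     return _RULES[best][1] if best < len(_RULES) else "mobile platforms"
-- ===== Notes on version B (the rewrite author's own statement) =====
-- stated objective: alternative
-- what changed: Replaced the four separate any() scans over the dependency list by a single pass that, per dependency, scans an ordered (keyword, message) table and keeps the minimum matching priority index, returning the table message for the best index found.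
import Mathlib
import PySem

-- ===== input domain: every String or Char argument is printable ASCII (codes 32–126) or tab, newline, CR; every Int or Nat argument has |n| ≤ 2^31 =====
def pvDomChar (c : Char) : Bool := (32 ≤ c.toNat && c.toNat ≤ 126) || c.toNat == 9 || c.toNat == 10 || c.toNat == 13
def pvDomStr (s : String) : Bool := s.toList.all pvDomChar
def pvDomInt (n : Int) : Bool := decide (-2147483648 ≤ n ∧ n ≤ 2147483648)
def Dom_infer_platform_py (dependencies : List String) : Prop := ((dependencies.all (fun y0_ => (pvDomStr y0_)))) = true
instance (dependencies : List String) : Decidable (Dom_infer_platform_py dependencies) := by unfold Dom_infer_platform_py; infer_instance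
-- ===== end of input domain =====

-- B replaces A's four any() scans by one pass keeping the minimum matching priority index (alternative decomposition, same cost).

-- ===== PORT A =====
def infer_platform_py (dependencies : List String) : String :=
  if dependencies.any (fun dep => PySem.Str.isIn "react-native" (PySem.Str.lower dep)) then
    "iOS and Android using React Native"
  else if dependencies.any (fun dep => PySem.Str.isIn "flutter" (PySem.Str.lower dep)) then
    "cross-platform mobile development with Flutter"
  else if dependencies.any (fun dep => PySem.Str.isIn "swift" (PySem.Str.lower dep)) then
    "iOS devices"
  else if dependencies.any (fun dep => PySem.Str.isIn "kotlin" (PySem.Str.lower dep)) then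
    "Android devices"
  else
    "mobile platforms"

-- ===== PORT B =====
def pvRules : List (String × String) :=
  [("react-native", "iOS and Android using React Native"),
   ("flutter", "cross-platform mobile development with Flutter"),
   ("swift", "iOS devices"),
   ("kotlin", "Android devices")]

def infer_platform_py_alt (dependencies : List String) : String :=
  let best : Int := PySem.List.len pvRules
  let best := dependencies.foldl (fun best dep =>
    let low := PySem.Str.lower dep
    (PySem.List.enumerate pvRules).foldl (fun best p =>
      if decide (p.1 < best) && PySem.Str.isIn p.2.1 low then p.1 else best) best) best
  if best < PySem.List.len pvRules then (PySem.List.pyGetD pvRules best ("", "")).2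
  else "mobile platforms"

-- ===== PRECONDITION & SPEC =====
def Spec_infer_platform_py (dependencies : List String) (out : String) : Prop := out = infer_platform_py_alt dependencies
instance (dependencies : List String) (out : String) : Decidable (Spec_infer_platform_py dependencies out) := by unfold Spec_infer_platform_py; infer_instance

-- ===== CLAIM (what is proved, stated in full; the proofs are below) =====
def Claim_equal_infer_platform_py : Prop := ∀ (dependencies : List String), Dom_infer_platform_py dependencies → Spec_infer_platform_py dependencies (infer_platform_py dependencies)

-- ===== LEMMAS AND PROOFS =====

-- priority index of a single dependency: smallest matching rule index, else 4
def pvDepIdx (dep : String) : Int :=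
  let low := PySem.Str.lower dep
  if PySem.Str.isIn "react-native" low then 0
  else if PySem.Str.isIn "flutter" low then 1
  else if PySem.Str.isIn "swift" low then 2
  else if PySem.Str.isIn "kotlin" low then 3
  else 4

-- the inner fold over the rule table is 'min best (pvDepIdx dep)'
set_option maxHeartbeats 800000 in
theorem pvStep_eq (best : Int) (dep : String) (hb : best ≤ 4) :
    (PySem.List.enumerate pvRules).foldl (fun best p =>
      if decide (p.1 < best) && PySem.Str.isIn p.2.1 (PySem.Str.lower dep) then p.1 else best) best
      = min best (pvDepIdx dep) := by
  have e : PySem.List.enumerate pvRules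
      = [(0, ("react-native", "iOS and Android using React Native")),
         (1, ("flutter", "cross-platform mobile development with Flutter")),
         (2, ("swift", "iOS devices")),
         (3, ("kotlin", "Android devices"))] := by rfl
  rw [e]
  simp only [List.foldl, pvDepIdx]
  rcases Bool.eq_false_or_eq_true (PySem.Str.isIn "react-native" (PySem.Str.lower dep)) with h0 | h0 <;>
  rcases Bool.eq_false_or_eq_true (PySem.Str.isIn "flutter" (PySem.Str.lower dep)) with h1 | h1 <;>
  rcases Bool.eq_false_or_eq_true (PySem.Str.isIn "swift" (PySem.Str.lower dep)) with h2 | h2 <;>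
  rcases Bool.eq_false_or_eq_true (PySem.Str.isIn "kotlin" (PySem.Str.lower dep)) with h3 | h3 <;>
    simp only [h0, h1, h2, h3, Bool.and_false, Bool.and_true, Bool.false_eq_true,
      if_false, decide_eq_true_eq] <;>
    (try split_ifs) <;> omega

-- best index over the whole list, in A's branch order
def pvBestIdx (deps : List String) : Int :=
  if deps.any (fun dep => PySem.Str.isIn "react-native" (PySem.Str.lower dep)) then 0
  else if deps.any (fun dep => PySem.Str.isIn "flutter" (PySem.Str.lower dep)) then 1
  else if deps.any (fun dep => PySem.Str.isIn "swift" (PySem.Str.lower dep)) then 2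
  else if deps.any (fun dep => PySem.Str.isIn "kotlin" (PySem.Str.lower dep)) then 3
  else 4

set_option maxHeartbeats 1600000 in
theorem pvBestIdx_cons (d : String) (ds : List String) :
    pvBestIdx (d :: ds) = min (pvDepIdx d) (pvBestIdx ds) := by
  simp only [pvBestIdx, pvDepIdx, List.any_cons]
  rcases Bool.eq_false_or_eq_true (PySem.Str.isIn "react-native" (PySem.Str.lower d)) with h0 | h0 <;>
  rcases Bool.eq_false_or_eq_true (PySem.Str.isIn "flutter" (PySem.Str.lower d)) with h1 | h1 <;>
  rcases Bool.eq_false_or_eq_true (PySem.Str.isIn "swift" (PySem.Str.lower d)) with h2 | h2 <;>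
  rcases Bool.eq_false_or_eq_true (PySem.Str.isIn "kotlin" (PySem.Str.lower d)) with h3 | h3 <;>
  rcases Bool.eq_false_or_eq_true (ds.any (fun dep => PySem.Str.isIn "react-native" (PySem.Str.lower dep))) with a0 | a0 <;>
  rcases Bool.eq_false_or_eq_true (ds.any (fun dep => PySem.Str.isIn "flutter" (PySem.Str.lower dep))) with a1 | a1 <;>
  rcases Bool.eq_false_or_eq_true (ds.any (fun dep => PySem.Str.isIn "swift" (PySem.Str.lower dep))) with a2 | a2 <;>
  rcases Bool.eq_false_or_eq_true (ds.any (fun dep => PySem.Str.isIn "kotlin" (PySem.Str.lower dep))) with a3 | a3 <;>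
    simp only [h0, h1, h2, h3, a0, a1, a2, a3, Bool.or_false, Bool.or_true,
      Bool.or_true, Bool.false_eq_true, if_false, if_true] <;> decide

theorem pvFold_eq (deps : List String) : ∀ best : Int, best ≤ 4 →
    deps.foldl (fun best dep =>
      (PySem.List.enumerate pvRules).foldl (fun best p =>
        if decide (p.1 < best) && PySem.Str.isIn p.2.1 (PySem.Str.lower dep) then p.1 else best) best) best
      = min best (pvBestIdx deps) := by
  induction deps with
  | nil =>
    intro best hb
    have h4 : pvBestIdx [] = 4 := by decide
    simp only [List.foldl, h4]
    omega
  | cons d ds ih =>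
    intro best hb
    have hd : pvDepIdx d ≤ 4 := by
      simp only [pvDepIdx]; split_ifs <;> omega
    simp only [List.foldl]
    rw [pvStep_eq best d hb, ih (min best (pvDepIdx d)) (by omega), pvBestIdx_cons]
    omega

set_option maxHeartbeats 800000 in
theorem infer_platform_py_spec : Claim_equal_infer_platform_py := by
  intro deps _
  unfold Spec_infer_platform_py infer_platform_py_alt infer_platform_py
  have hlen : PySem.List.len pvRules = 4 := by rfl
  simp only [hlen]
  rw [pvFold_eq deps 4 (by omega)]
  simp only [pvBestIdx]
  rcases Bool.eq_false_or_eq_true (deps.any (fun dep => PySem.Str.isIn "react-native" (PySem.Str.lower dep))) with a0 | a0 <;>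
  rcases Bool.eq_false_or_eq_true (deps.any (fun dep => PySem.Str.isIn "flutter" (PySem.Str.lower dep))) with a1 | a1 <;>
  rcases Bool.eq_false_or_eq_true (deps.any (fun dep => PySem.Str.isIn "swift" (PySem.Str.lower dep))) with a2 | a2 <;>
  rcases Bool.eq_false_or_eq_true (deps.any (fun dep => PySem.Str.isIn "kotlin" (PySem.Str.lower dep))) with a3 | a3 <;>
    simp only [a0, a1, a2, a3, Bool.false_eq_true, if_false, if_true] <;> decide
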